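-- pv_equiv track=rewrite | github.com/leakedweights/llms-for-trials | src/hint/HINT/protocol_embedding.py | split_protocol
-- ===== SOURCE A (Python) =====
-- def clean_protocol(protocol):
--     protocol = protocol.lower().split('\n')
--     return [line.strip() for line in protocol if line.strip()]
--
-- def split_protocol(protocol):
--     protocol_split = clean_protocol(protocol)
--     inclusion_idx = exclusion_idx = len(protocol_split)
--
--     for idx, sentence in enumerate(protocol_split):
--         if "inclusion" in sentence: inclusion_idx = idx
--         if "exclusion" in sentence: exclusion_idx = idx
--
--     if inclusion_idx < exclusion_idx < len(protocol_split):
--         return protocol_split[inclusion_idx:exclusion_idx], protocol_split[exclusion_idx:]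
--     return (protocol_split,)
-- ===== SOURCE B (Python) =====
-- def clean_protocol(protocol):
--     protocol = protocol.lower().split('\n')
--     return [line.strip() for line in protocol if line.strip()]
--
-- def _last_line_index(lines, keyword):
--     # index of the LAST line containing keyword, scanning right-to-left; len(lines) if absent
--     for idx in range(len(lines) - 1, -1, -1):
--         if keyword in lines[idx]:
--             return idx
--     return len(lines)
--
-- def split_protocol(protocol):
--     protocol_split = clean_protocol(protocol)
--     inclusion_idx = _last_line_index(protocol_split, "inclusion")
--     exclusion_idx = _last_line_index(protocol_split, "exclusion")
--     if inclusion_idx < exclusion_idx < len(protocol_split):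
--         return protocol_split[inclusion_idx:exclusion_idx], protocol_split[exclusion_idx:]
--     return (protocol_split,)
-- ===== Notes on version B (the rewrite author's own statement) =====
-- stated objective: alternative
-- what changed: Replaces the single forward sweep that keeps overwriting both indices with two independent right-to-left searches that return at the first (i.e. last-in-order) line containing each keyword, defaulting to len(lines).
import Mathlib
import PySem

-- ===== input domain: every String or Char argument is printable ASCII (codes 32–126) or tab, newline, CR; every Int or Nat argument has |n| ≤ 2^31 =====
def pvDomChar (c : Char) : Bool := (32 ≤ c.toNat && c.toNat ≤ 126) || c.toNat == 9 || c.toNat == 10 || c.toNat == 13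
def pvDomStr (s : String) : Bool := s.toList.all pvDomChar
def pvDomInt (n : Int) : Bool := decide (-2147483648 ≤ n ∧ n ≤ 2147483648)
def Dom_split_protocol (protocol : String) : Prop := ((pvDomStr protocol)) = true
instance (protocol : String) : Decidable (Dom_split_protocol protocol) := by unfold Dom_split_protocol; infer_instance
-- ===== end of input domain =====

-- B replaces A's single forward index-overwriting sweep by two independent right-to-left
-- searches (first hit from the end = last matching line, default len); same results.


-- ===== PORT A =====
-- shared helper (identical in A and B's Python sources)
def clean_protocol (protocol : String) : List String :=
  let lines := (PySem.Chars.splitOn (PySem.Str.lower protocol).toList ['\n']).map String.ofList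
  (lines.filter (fun line => PySem.Str.strip line ≠ "")).map (fun line => PySem.Str.strip line)

def split_protocol (protocol : String) : List (List String) :=
  let protocol_split := clean_protocol protocol
  let n : Int := protocol_split.length
  let r := (PySem.List.enumerate protocol_split).foldl
    (fun (st : Int × Int) (p : Int × String) =>
      let st1 := if PySem.Str.isIn "inclusion" p.2 then (p.1, st.2) else st
      if PySem.Str.isIn "exclusion" p.2 then (st1.1, p.1) else st1)
    (n, n)
  if r.1 < r.2 ∧ r.2 < n then
    [PySem.List.slice protocol_split (some r.1) (some r.2),
     PySem.List.slice protocol_split (some r.2) none]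
  else [protocol_split]

-- ===== PORT B =====
-- for idx in range(i-1, -1, -1): if keyword in lines[idx]: return idx;  return len(lines)
def lastLineIndexGo (lines : List String) (keyword : String) : Nat → Nat
  | 0 => lines.length
  | i + 1 => if PySem.Str.isIn keyword (lines.getD i "") then i else lastLineIndexGo lines keyword i

def lastLineIndex (lines : List String) (keyword : String) : Nat :=
  lastLineIndexGo lines keyword lines.length

def split_protocol_alt (protocol : String) : List (List String) :=
  let protocol_split := clean_protocol protocol
  let inclusion_idx := lastLineIndex protocol_split "inclusion"
  let exclusion_idx := lastLineIndex protocol_split "exclusion"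
  if inclusion_idx < exclusion_idx ∧ exclusion_idx < protocol_split.length then
    [PySem.List.slice protocol_split (some (inclusion_idx : Int)) (some (exclusion_idx : Int)),
     PySem.List.slice protocol_split (some (exclusion_idx : Int)) none]
  else [protocol_split]

-- ===== PRECONDITION & SPEC =====
def Spec_split_protocol (protocol : String) (out : List (List String)) : Prop := out = split_protocol_alt protocol
instance (protocol : String) (out : List (List String)) : Decidable (Spec_split_protocol protocol out) := by unfold Spec_split_protocol; infer_instance

-- ===== CLAIM (what is proved, stated in full; the proofs are below) =====
def Claim_equal_split_protocol : Prop := ∀ (protocol : String), Dom_split_protocol protocol → Spec_split_protocol protocol (split_protocol protocol)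

-- ===== LEMMAS AND PROOFS =====

-- single-keyword fold step of A
def lastF (kw : String) (a : Int) (p : Int × String) : Int :=
  if PySem.Str.isIn kw p.2 then p.1 else a

-- reverse search with an explicit default (proof-side generalisation of lastLineIndexGo)
def searchRev (lines : List String) (kw : String) (d : Nat) : Nat → Nat
  | 0 => d
  | i + 1 => if PySem.Str.isIn kw (lines.getD i "") then i else searchRev lines kw d i

theorem lastLineIndexGo_eq_searchRev (lines : List String) (kw : String) (i : Nat) :
    lastLineIndexGo lines kw i = searchRev lines kw lines.length i := by
  induction i with
  | zero => rfl
  | succ i ih => simp [lastLineIndexGo, searchRev, ih]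

theorem searchRev_append (qs : List String) (x : String) (kw : String) (d : Nat) (i : Nat)
    (hi : i ≤ qs.length) : searchRev (qs ++ [x]) kw d i = searchRev qs kw d i := by
  induction i with
  | zero => rfl
  | succ i ih =>
    have h1 : i < qs.length := hi
    have hg : (qs ++ [x]).getD i "" = qs.getD i "" := by
      simp [List.getD, List.getElem?_append_left h1]
    rw [searchRev, searchRev, hg, ih (Nat.le_of_lt h1)]

-- A's pair fold splits into two independent single-keyword folds
theorem fold_pair_split (l : List (Int × String)) (st : Int × Int) :
    l.foldl (fun (st : Int × Int) (p : Int × String) =>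
        let st1 := if PySem.Str.isIn "inclusion" p.2 then (p.1, st.2) else st
        if PySem.Str.isIn "exclusion" p.2 then (st1.1, p.1) else st1) st
    = (l.foldl (lastF "inclusion") st.1, l.foldl (lastF "exclusion") st.2) := by
  induction l generalizing st with
  | nil => rfl
  | cons p l ih =>
    simp only [List.foldl_cons]
    rw [ih]
    congr 1 <;> simp [lastF] <;> split_ifs <;> rfl

-- A's forward fold computes the reverse search
theorem foldl_lastF_eq_searchRev (lines : List String) (kw : String) (dN : Nat) :
    (PySem.List.enumerate lines).foldl (lastF kw) (dN : Int)
      = ((searchRev lines kw dN lines.length : Nat) : Int) := by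
  induction lines using List.reverseRecOn with
  | nil => rfl
  | append_singleton qs x ih =>
    rw [PySem.List.enumerate_append, List.foldl_append, ih]
    have hget : (qs ++ [x]).getD qs.length "" = x := by
      simp [List.getD]
    have hlen : (qs ++ [x]).length = qs.length + 1 := by simp
    rw [hlen, searchRev, hget]
    simp only [PySem.List.enumerate, List.foldl_cons, List.foldl_nil, lastF]
    split_ifs with h
    · omega
    · exact congrArg _ (searchRev_append qs x kw dN qs.length (Nat.le_refl _)).symm

theorem split_protocol_eq (protocol : String) :
    split_protocol protocol = split_protocol_alt protocol := by
  unfold split_protocol split_protocol_alt lastLineIndex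
  simp only [fold_pair_split, foldl_lastF_eq_searchRev, lastLineIndexGo_eq_searchRev]
  generalize clean_protocol protocol = ps
  generalize searchRev ps "inclusion" ps.length ps.length = i
  generalize searchRev ps "exclusion" ps.length ps.length = e
  have hc : ((i : Int) < (e : Int) ∧ (e : Int) < (ps.length : Int)) ↔
      (i < e ∧ e < ps.length) := by
    constructor <;> (intro h; exact ⟨by exact_mod_cast h.1, by exact_mod_cast h.2⟩)
  rw [if_congr hc rfl rfl]

-- ===== VERDICT (by name: the statement is the Claim_ definition above) =====
theorem split_protocol_spec : Claim_equal_split_protocol := by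
  intro protocol _
  unfold Spec_split_protocol
  exact split_protocol_eq protocol
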